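-- pv_equiv track=rewrite | github.com/bedwards/sonnet | Data_Packages_User/sonnet.py | rhyme_key
-- ===== SOURCE A (Python) =====
-- def rhyme_key(pronunciation):
--     rhyme_key = []
--     for c in reversed(pronunciation):
--         if (c == '-'
--                 and ('0' in rhyme_key
--                      or '1' in rhyme_key
--                      or '2' in rhyme_key)):
--             break
--         rhyme_key.append(c)
--     return ''.join(reversed(rhyme_key))
-- ===== SOURCE B (Python) =====
-- def rhyme_key(pronunciation):
--     chars = list(pronunciation)
--     d = None
--     for i, c in enumerate(chars):
--         if c in ('0', '1', '2'):
--             d = i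
--     if d is None:
--         return ''.join(chars)
--     cut = None
--     for i, c in enumerate(chars):
--         if i < d and c == '-':
--             cut = i
--     if cut is None:
--         return ''.join(chars)
--     return ''.join(chars[cut + 1:])
-- ===== Notes on version B (the rewrite author's own statement) =====
-- stated objective: alternative
-- what changed: Replaces A's reverse-iterate-and-accumulate-until-break loop (with membership tests on the growing accumulator) by two forward index scans (index of the last stress digit, then index of the last '-' before it) followed by a single suffix slice.
import Mathlib
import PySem

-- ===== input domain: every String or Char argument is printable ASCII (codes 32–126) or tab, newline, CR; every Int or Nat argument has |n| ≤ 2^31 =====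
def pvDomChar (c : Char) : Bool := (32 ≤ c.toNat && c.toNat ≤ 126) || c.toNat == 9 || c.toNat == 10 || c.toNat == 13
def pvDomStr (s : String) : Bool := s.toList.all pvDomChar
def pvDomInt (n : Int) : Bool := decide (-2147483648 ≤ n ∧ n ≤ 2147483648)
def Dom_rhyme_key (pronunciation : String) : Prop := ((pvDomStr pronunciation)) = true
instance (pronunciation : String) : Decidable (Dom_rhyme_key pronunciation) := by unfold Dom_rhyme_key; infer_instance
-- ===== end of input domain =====

-- B replaces A's reverse-accumulate-until-break loop by two forward index scans
-- (last stress digit, then last '-' before it) and one suffix slice (objective: alternative decomposition).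

-- ===== PORT A =====
-- A's loop over reversed(pronunciation), accumulator appended at the end,
-- break when c == '-' and a stress digit is already in the accumulator.
def rkLoopA : List Char → List Char → List Char
  | acc, [] => acc
  | acc, c :: cs =>
    if c = '-' ∧ ('0' ∈ acc ∨ '1' ∈ acc ∨ '2' ∈ acc) then acc
    else rkLoopA (acc ++ [c]) cs

def rhyme_key (pronunciation : String) : String :=
  ((rkLoopA [] pronunciation.toList.reverse).reverse).asString

-- ===== PORT B =====
def isStress (c : Char) : Bool := c == '0' || c == '1' || c == '2'

-- first forward scan of B: index of the LAST stress digit (None if absent)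
def scanLastStress : List Char → Nat → Option Nat → Option Nat
  | [], _, d => d
  | c :: cs, i, d => scanLastStress cs (i + 1) (if isStress c then some i else d)

-- second forward scan of B: index of the LAST '-' strictly before index d (None if absent)
def scanLastDash : List Char → Nat → Nat → Option Nat → Option Nat
  | [], _, _, cut => cut
  | c :: cs, i, d, cut => scanLastDash cs (i + 1) d (if i < d ∧ c = '-' then some i else cut)

def rhyme_key_alt (pronunciation : String) : String :=
  let chars := pronunciation.toList
  match scanLastStress chars 0 none with
  | none => chars.asString
  | some d =>
    match scanLastDash chars 0 d none with
    | none => chars.asString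
    | some cut => (chars.drop (cut + 1)).asString

-- ===== PRECONDITION & SPEC =====
def Spec_rhyme_key (pronunciation : String) (out : String) : Prop := out = rhyme_key_alt pronunciation
instance (pronunciation : String) (out : String) : Decidable (Spec_rhyme_key pronunciation out) := by unfold Spec_rhyme_key; infer_instance

-- ===== CLAIM (what is proved, stated in full; the proofs are below) =====
def Claim_equal_rhyme_key : Prop := ∀ (pronunciation : String), Dom_rhyme_key pronunciation → Spec_rhyme_key pronunciation (rhyme_key pronunciation)

-- ===== LEMMAS AND PROOFS =====

-- Reference recursion: A's loop with the accumulator abstracted into a "stress seen" flag.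
def hA : Bool → List Char → List Char
  | _, [] => []
  | seen, c :: cs => if c = '-' ∧ seen = true then [] else c :: hA (seen || isStress c) cs

theorem mem_stress_iff (acc : List Char) :
    ('0' ∈ acc ∨ '1' ∈ acc ∨ '2' ∈ acc) ↔ acc.any isStress = true := by
  simp only [List.any_eq_true, isStress, Bool.or_eq_true, beq_iff_eq]
  constructor
  · rintro (h | h | h) <;> exact ⟨_, h, by simp⟩
  · rintro ⟨c, hc, (h | h) | h⟩ <;> subst h <;> tauto

theorem rkLoopA_eq_hA (r : List Char) : ∀ acc, rkLoopA acc r = acc ++ hA (acc.any isStress) r := by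
  induction r with
  | nil => intro acc; simp [rkLoopA, hA]
  | cons c cs ih =>
    intro acc
    by_cases hb : c = '-' ∧ ('0' ∈ acc ∨ '1' ∈ acc ∨ '2' ∈ acc)
    · have hb' : c = '-' ∧ acc.any isStress = true := ⟨hb.1, (mem_stress_iff acc).1 hb.2⟩
      simp [rkLoopA, hA, hb, hb']
    · have hb' : ¬ (c = '-' ∧ acc.any isStress = true) := by
        rw [← mem_stress_iff]; exact hb
      simp only [rkLoopA, hA, if_neg hb, if_neg hb', ih]
      simp [List.any_append, isStress]

theorem hA_false_of_no_stress (l : List Char) (h : l.any isStress = false) : hA false l = l := by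
  induction l with
  | nil => rfl
  | cons c cs ih =>
    simp only [List.any_cons, Bool.or_eq_false_iff] at h
    simp [hA, h.1, ih h.2]

theorem hA_true_eq_takeWhile (l : List Char) : hA true l = l.takeWhile (fun c => !(c == '-')) := by
  induction l with
  | nil => rfl
  | cons c cs ih =>
    by_cases hc : c = '-'
    · simp [hA, hc]
    · have hb : (!(c == '-')) = true := by simp [hc]
      simp [hA, hc, hb, ih]

theorem scanLastStress_append (xs : List Char) (c : Char) :
    ∀ (i : Nat) (d : Option Nat),
    scanLastStress (xs ++ [c]) i d =
      if isStress c then some (i + xs.length) else scanLastStress xs i d := by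
  induction xs with
  | nil => intro i d; simp [scanLastStress]
  | cons x xs ih =>
    intro i d
    simp only [List.cons_append, scanLastStress, ih, List.length_cons]
    have hn : i + 1 + xs.length = i + (xs.length + 1) := by omega
    rw [hn]

theorem scanLastStress_none (xs : List Char) :
    ∀ (i : Nat) (d : Option Nat), scanLastStress xs i d = none → d = none ∧ xs.any isStress = false := by
  induction xs with
  | nil => intro i d h; simpa [scanLastStress] using h
  | cons x xs ih =>
    intro i d h
    have := ih (i + 1) _ h
    rcases this with ⟨h1, h2⟩
    by_cases hx : isStress x
    · simp [hx] at h1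
    · simp [hx] at h1
      simp [h1, h2, hx]

theorem scanLastDash_append (xs : List Char) (c : Char) :
    ∀ (i d : Nat) (cut : Option Nat),
    scanLastDash (xs ++ [c]) i d cut =
      if i + xs.length < d ∧ c = '-' then some (i + xs.length) else scanLastDash xs i d cut := by
  induction xs with
  | nil => intro i d cut; simp [scanLastDash]
  | cons x xs ih =>
    intro i d cut
    simp only [List.cons_append, scanLastDash, ih, List.length_cons]
    have : i + (xs.length + 1) = i + 1 + xs.length := by omega
    rw [this]

theorem scanLastDash_mono (xs : List Char) :
    ∀ (i d d' : Nat) (cut : Option Nat), i + xs.length ≤ d → i + xs.length ≤ d' →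
    scanLastDash xs i d cut = scanLastDash xs i d' cut := by
  induction xs with
  | nil => intro i d d' cut _ _; rfl
  | cons x xs ih =>
    intro i d d' cut hd hd'
    simp only [List.length_cons] at hd hd'
    simp only [scanLastDash]
    have h1 : i < d := by omega
    have h2 : i < d' := by omega
    rw [ih (i + 1) d d' _ (by omega) (by omega)]
    congr 1
    simp [h1, h2]

theorem scanLastDash_some (xs : List Char) :
    ∀ (i d : Nat) (cut0 : Option Nat) (cut : Nat), scanLastDash xs i d cut0 = some cut →
    cut0 = some cut ∨ (cut < d ∧ i ≤ cut ∧ cut < i + xs.length) := by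
  induction xs with
  | nil => intro i d cut0 cut h; left; simpa [scanLastDash] using h
  | cons x xs ih =>
    intro i d cut0 cut h
    rcases ih (i + 1) d _ cut h with h1 | h1
    · by_cases hx : i < d ∧ x = '-'
      · simp only [hx] at h1
        right
        have : cut = i := by simpa using h1.symm
        subst this
        exact ⟨hx.1, le_refl _, by simp only [List.length_cons]; omega⟩
      · simp only [hx] at h1
        left; exact h1
    · right; simp only [List.length_cons]; exact ⟨h1.1, by omega, by omega⟩

theorem scanLastStress_some (xs : List Char) :
    ∀ (i : Nat) (d0 : Option Nat) (d : Nat), scanLastStress xs i d0 = some d →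
    d0 = some d ∨ (i ≤ d ∧ d < i + xs.length) := by
  induction xs with
  | nil => intro i d0 d h; left; simpa [scanLastStress] using h
  | cons x xs ih =>
    intro i d0 d h
    rcases ih (i + 1) _ d h with h1 | h1
    · by_cases hx : isStress x
      · simp only [hx] at h1
        right
        have : d = i := by simpa using h1.symm
        subst this
        exact ⟨le_refl _, by simp only [List.length_cons]; omega⟩
      · simp only [hx] at h1
        left; exact h1
    · right; simp only [List.length_cons]; omega

-- core of B, on lists
def bCore (l : List Char) : List Char :=
  (scanLastStress l 0 none).elim l
    (fun d => (scanLastDash l 0 d none).elim l (fun cut => l.drop (cut + 1)))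

theorem rhyme_key_alt_eq_bCore (p : String) : rhyme_key_alt p = (bCore p.toList).asString := by
  unfold rhyme_key_alt bCore
  cases h : scanLastStress p.toList 0 none with
  | none => simp [h]
  | some d =>
    cases h2 : scanLastDash p.toList 0 d none with
    | none => simp [h, h2]
    | some cut => simp [h, h2]

-- suffix after the last '-' equals the reversed takeWhile of the reversal
theorem lastDash_takeWhile (xs : List Char) :
    ((xs.reverse.takeWhile (fun c => !(c == '-'))).reverse) =
      (scanLastDash xs 0 xs.length none).elim xs (fun cut => xs.drop (cut + 1)) := by
  induction xs using List.reverseRecOn with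
  | nil => rfl
  | append_singleton ys y ih =>
    rw [scanLastDash_append]
    by_cases hy : y = '-'
    · have hcond : 0 + ys.length < (ys ++ [y]).length ∧ y = '-' := by
        simp [hy]
      rw [if_pos hcond]
      subst hy
      simp
    · have hcond : ¬ (0 + ys.length < (ys ++ [y]).length ∧ y = '-') := by
        simp [hy]
      rw [if_neg hcond]
      rw [scanLastDash_mono ys 0 (ys ++ [y]).length ys.length none (by simp) (by simp)]
      simp only [List.reverse_append, List.reverse_singleton, List.singleton_append,
        List.takeWhile]
      have hyb : (!(y == '-')) = true := by simp [hy]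
      rw [hyb]
      simp only [List.reverse_cons]
      rw [ih]
      cases hs : scanLastDash ys 0 ys.length none with
      | none => simp
      | some cut =>
        have hc := scanLastDash_some ys 0 ys.length none cut hs
        have hcut : cut < ys.length := by
          rcases hc with h | h
          · simp at h
          · omega
        simp only [Option.elim_some]
        rw [List.drop_append_of_le_length (by omega)]

theorem bCore_eq_hA (l : List Char) : bCore l = (hA false l.reverse).reverse := by
  induction l using List.reverseRecOn with
  | nil => rfl
  | append_singleton xs x ih =>
    unfold bCore
    rw [scanLastStress_append]
    by_cases hx : isStress x
    · rw [if_pos hx]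
      simp only [Option.elim_some]
      have hx' : x ≠ '-' := by
        intro he; subst he; exact absurd hx (by decide)
      rw [scanLastDash_append]
      have hcond : ¬ (0 + xs.length < 0 + xs.length ∧ x = '-') := by omega
      rw [if_neg hcond]
      have : (xs ++ [x]).reverse = x :: xs.reverse := by simp
      rw [this]
      have hstep : hA false (x :: xs.reverse) = x :: hA true xs.reverse := by
        simp [hA, hx', hx]
      rw [hstep, hA_true_eq_takeWhile, List.reverse_cons]
      have := lastDash_takeWhile xs
      rw [this]
      have hz : (0 : Nat) + xs.length = xs.length := by omega
      rw [hz]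
      cases hs : scanLastDash xs 0 xs.length none with
      | none => simp
      | some cut =>
        have hc := scanLastDash_some xs 0 xs.length none cut hs
        have hcut : cut < xs.length := by
          rcases hc with h | h
          · simp at h
          · omega
        simp only [Option.elim_some]
        rw [List.drop_append_of_le_length (by omega)]
    · rw [if_neg hx]
      have hrev : (xs ++ [x]).reverse = x :: xs.reverse := by simp
      cases hs : scanLastStress xs 0 none with
      | none =>
        have hns := (scanLastStress_none xs 0 none hs).2
        rw [hrev]
        have : hA false (x :: xs.reverse) = x :: hA false xs.reverse := by
          simp [hA, hx]
        rw [this, hA_false_of_no_stress _ (by simp [List.any_reverse, hns])]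
        simp
      | some d =>
        have hd := scanLastStress_some xs 0 none d hs
        have hdlt : d < xs.length := by
          rcases hd with h | h
          · simp at h
          · omega
        simp only [Option.elim_some]
        rw [scanLastDash_append]
        have hcond : ¬ (0 + xs.length < d ∧ x = '-') := by omega
        rw [if_neg hcond]
        rw [hrev]
        have hstep : hA false (x :: xs.reverse) = x :: hA (isStress x) xs.reverse := by
          simp [hA, hx]
        rw [hstep]
        have hxf : isStress x = false := by simpa using hx
        rw [hxf, List.reverse_cons]
        unfold bCore at ih
        rw [hs] at ih
        simp only [Option.elim_some] at ih
        cases hc : scanLastDash xs 0 d none with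
        | none =>
          rw [hc] at ih
          simp only [Option.elim_none] at ih
          simp [← ih]
        | some cut =>
          rw [hc] at ih
          simp only [Option.elim_some] at ih
          have hco := scanLastDash_some xs 0 d none cut hc
          have hcut : cut < d := by
            rcases hco with h | h
            · simp at h
            · omega
          simp only [Option.elim_some]
          rw [List.drop_append_of_le_length (by omega), ← ih]

-- ===== VERDICT (by name: the statement is the Claim_ definition above) =====
theorem rhyme_key_spec : Claim_equal_rhyme_key := by
  intro p _
  unfold Spec_rhyme_key
  rw [rhyme_key_alt_eq_bCore, bCore_eq_hA]
  unfold rhyme_key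
  rw [rkLoopA_eq_hA]
  simp [List.any_nil]
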